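-- pv_equiv track=rewrite | github.com/w1sdm/pi-exchange | src/gui/gui-v0.2.py | splitIntoPackets
-- ===== SOURCE A (Python) =====
-- def splitIntoPackets(data):
--     """Identify separate packets and return them"""
--     packets = [""]
--     for line in data.split("\n"):
--         if line == '-'*18 or line == '~'*18:
--             if packets[-1] != '':
--                 packets.append('')
--         else:
--             packets[-1] = packets[-1] + line + '\n'
--     if packets[-1] == '':
--         packets = packets[:-1]
--     return packets
-- ===== SOURCE B (Python) =====
-- def splitIntoPackets(data):
--     """Identify separate packets and return them"""
--     DELIMS = ('-' * 18, '~' * 18)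
--     lines = data.split('\n')
--     n = len(lines)
--     packets = []
--     i = 0
--     while i < n:
--         if lines[i] in DELIMS:
--             i += 1
--             continue
--         j = i
--         while j < n and lines[j] not in DELIMS:
--             j += 1
--         packets.append(''.join(line + '\n' for line in lines[i:j]))
--         i = j
--     return packets
-- ===== Notes on version B (the rewrite author's own statement) =====
-- stated objective: alternative
-- what changed: Replaces A's grow-the-last-packet accumulator (with the open-new-empty guard and trailing-empty trim) by a two-pointer run scanner: skip delimiter lines, find each maximal non-delimiter run [i:j] and join it into one packet, so no empty packet ever exists.
import Mathlib
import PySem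

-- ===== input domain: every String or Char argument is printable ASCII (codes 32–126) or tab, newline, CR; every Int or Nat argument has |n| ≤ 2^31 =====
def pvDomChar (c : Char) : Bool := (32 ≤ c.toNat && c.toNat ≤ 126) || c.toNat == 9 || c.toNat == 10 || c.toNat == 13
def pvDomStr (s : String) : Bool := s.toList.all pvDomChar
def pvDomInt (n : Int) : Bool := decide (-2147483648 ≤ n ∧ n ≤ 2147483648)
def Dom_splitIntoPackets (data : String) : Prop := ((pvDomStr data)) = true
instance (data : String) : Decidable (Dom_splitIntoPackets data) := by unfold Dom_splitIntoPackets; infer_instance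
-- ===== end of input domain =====

-- B replaces A's grow-the-last-packet accumulator (with its open-new-empty guard and trailing
-- trim) by a two-pointer run scanner that joins each maximal non-delimiter run into one packet;
-- same cost, alternative structure.

-- ===== PORT A =====
def pvDelimDash : String := "------------------"   -- '-'*18
def pvDelimTilde : String := "~~~~~~~~~~~~~~~~~~"  -- '~'*18

def pvStepA (packets : List String) (line : String) : List String :=
  if line == pvDelimDash || line == pvDelimTilde then
    if packets.getLastD "" != "" then packets ++ [""] else packets
  else
    -- packets[-1] = packets[-1] + line + '\n' ; packets is never empty,
    -- so packets[-1] is its last element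
    packets.dropLast ++ [packets.getLastD "" ++ line ++ "\n"]

def splitIntoPackets (data : String) : List String :=
  -- data.split("\n"): the separator "\n" is non-empty, so split? is some; .getD [] is a totality guard only
  let lines := (PySem.Str.split? data "\n").getD []
  let packets := lines.foldl pvStepA [""]
  -- if packets[-1] == '': packets = packets[:-1]  (packets is never empty)
  if packets.getLastD "" == "" then packets.dropLast else packets

-- ===== PORT B =====
def pvIsDelim (line : String) : Bool := line == pvDelimDash || line == pvDelimTilde

-- ''.join(line + '\n' for line in run)
def pvJoinRun (run : List String) : String := PySem.Str.join "" (run.map (fun l => l ++ "\n"))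

-- the while loop over i: the suffix lines[i:] is the recursion argument; the inner while
-- advancing j delimits the run lines[i:j] = takeWhile, and i = j restarts at dropWhile
def pvScan : List String → List String
  | [] => []
  | l :: rest =>
    if pvIsDelim l then pvScan rest
    else
      pvJoinRun ((l :: rest).takeWhile (fun s => !pvIsDelim s)) ::
        pvScan ((l :: rest).dropWhile (fun s => !pvIsDelim s))
termination_by ls => ls.length
decreasing_by
  · simp
  · rename_i h
    simp only [List.dropWhile_cons, h, Bool.not_false, if_true]
    have := List.length_dropWhile_le (fun s => !pvIsDelim s) rest
    simp only [List.length_cons]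
    omega

def splitIntoPackets_alt (data : String) : List String :=
  pvScan ((PySem.Str.split? data "\n").getD [])

-- ===== PRECONDITION & SPEC =====
def Spec_splitIntoPackets (data : String) (out : List String) : Prop := out = splitIntoPackets_alt data
instance (data : String) (out : List String) : Decidable (Spec_splitIntoPackets data out) := by unfold Spec_splitIntoPackets; infer_instance

-- ===== CLAIM (what is proved, stated in full; the proofs are below) =====
def Claim_equal_splitIntoPackets : Prop := ∀ (data : String), Dom_splitIntoPackets data → Spec_splitIntoPackets data (splitIntoPackets data)

-- ===== LEMMAS AND PROOFS =====

-- A's intermediate result, reformulated: pvEmit cur ls runs A's loop on ls with current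
-- accumulator cur and already applies the final trailing-empty trim.
def pvEmit : String → List String → List String
  | cur, [] => if cur = "" then [] else [cur]
  | cur, l :: rest =>
    if pvIsDelim l then (if cur = "" then pvEmit "" rest else cur :: pvEmit "" rest)
    else pvEmit (cur ++ l ++ "\n") rest

-- A's final trim
def pvFin (ps : List String) : List String :=
  if ps.getLastD "" == "" then ps.dropLast else ps

theorem pvGetLastD_append (done ps : List String) (h : ps ≠ []) :
    (done ++ ps).getLastD "" = ps.getLastD "" := by
  have h2 : ps.getLast?.isSome := List.getLast?_isSome.mpr h
  obtain ⟨x, hx⟩ := Option.isSome_iff_exists.mp h2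
  simp [List.getLastD_eq_getLast?, List.getLast?_append, hx]

theorem pvStepA_append (done ps : List String) (l : String) (h : ps ≠ []) :
    pvStepA (done ++ ps) l = done ++ pvStepA ps l := by
  unfold pvStepA
  rw [pvGetLastD_append done ps h, List.dropLast_append_of_ne_nil h]
  split_ifs <;> simp

theorem pvStepA_ne_nil (ps : List String) (l : String) (h : ps ≠ []) :
    pvStepA ps l ≠ [] := by
  unfold pvStepA
  split_ifs <;> simp [h]

theorem pvFoldl_stepA_append (ls : List String) : ∀ (done ps : List String), ps ≠ [] →
    List.foldl pvStepA (done ++ ps) ls = done ++ List.foldl pvStepA ps ls := by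
  induction ls with
  | nil => intro done ps _; simp
  | cons l ls ih =>
    intro done ps h
    simp only [List.foldl_cons]
    rw [pvStepA_append done ps l h, ih done _ (pvStepA_ne_nil ps l h)]

theorem pvFoldl_stepA_ne_nil (ls : List String) : ∀ (ps : List String), ps ≠ [] →
    List.foldl pvStepA ps ls ≠ [] := by
  induction ls with
  | nil => intro ps h; simpa using h
  | cons l ls ih => intro ps h; exact ih _ (pvStepA_ne_nil ps l h)

theorem pvFin_cons (cur : String) (ps : List String) (h : ps ≠ []) :
    pvFin (cur :: ps) = cur :: pvFin ps := by
  unfold pvFin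
  rw [show cur :: ps = [cur] ++ ps from rfl, pvGetLastD_append [cur] ps h,
    List.dropLast_append_of_ne_nil h]
  split_ifs <;> simp

-- A's loop + final trim computes pvEmit
theorem pvFoldl_eq_emit (ls : List String) : ∀ (cur : String),
    pvFin (List.foldl pvStepA [cur] ls) = pvEmit cur ls := by
  induction ls with
  | nil => intro cur; simp [pvFin, pvEmit]
  | cons l rest ih =>
    intro cur
    simp only [List.foldl_cons, pvEmit]
    by_cases hd : pvIsDelim l = true
    · have hd' : (l == pvDelimDash || l == pvDelimTilde) = true := hd
      by_cases hc : cur = ""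
      · subst hc
        have h0 : pvStepA [""] l = [""] := by simp [pvStepA, hd']
        rw [h0, ih ""]
        simp [hd]
      · have : pvStepA [cur] l = [cur] ++ [""] := by
          simp [pvStepA, hd', hc]
        rw [this, pvFoldl_stepA_append rest [cur] [""] (by simp), List.singleton_append,
          pvFin_cons cur _ (pvFoldl_stepA_ne_nil rest [""] (by simp)), ih ""]
        simp [hd, hc]
    · have hd' : (l == pvDelimDash || l == pvDelimTilde) = false := by
        simpa [pvIsDelim] using hd
      have : pvStepA [cur] l = [cur ++ l ++ "\n"] := by
        simp [pvStepA, hd']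
      rw [this, ih (cur ++ l ++ "\n")]
      simp [hd]

theorem pvJoinRun_nil : pvJoinRun [] = "" := by decide

theorem pvJoinRun_cons (x : String) (xs : List String) :
    pvJoinRun (x :: xs) = (x ++ "\n") ++ pvJoinRun xs := by
  apply String.toList_inj.mp
  simp only [pvJoinRun, PySem.Str.toList_join, List.map_cons, List.map_map]
  cases xs with
  | nil => simp [PySem.Chars.join_singleton, PySem.Chars.join_nil]
  | cons b bs => simp [PySem.Chars.join_cons_cons]

theorem pvJoinRun_ne_empty (x : String) (xs : List String) : pvJoinRun (x :: xs) ≠ "" := by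
  intro h
  rw [pvJoinRun_cons] at h
  have := congrArg String.toList h
  simp at this

-- pvScan absorbs one emit step
theorem pvScan_step (ls : List String) :
    (if pvJoinRun (ls.takeWhile (fun s => !pvIsDelim s)) = ""
      then pvScan (ls.dropWhile (fun s => !pvIsDelim s))
      else pvJoinRun (ls.takeWhile (fun s => !pvIsDelim s)) ::
        pvScan (ls.dropWhile (fun s => !pvIsDelim s))) = pvScan ls := by
  cases ls with
  | nil => simp [pvJoinRun_nil, pvScan]
  | cons l rest =>
    by_cases hd : pvIsDelim l = true
    · simp [hd, pvJoinRun_nil, pvScan]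
    · simp only [List.takeWhile_cons, List.dropWhile_cons, hd, Bool.not_false, if_true]

      rw [if_neg (pvJoinRun_ne_empty _ _)]
      conv_rhs => rw [pvScan]
      simp [hd]

-- pvEmit with pending accumulator cur written in pvScan's run/rest form
theorem pvEmit_eq_scan_form (ls : List String) : ∀ (cur : String),
    pvEmit cur ls =
      (if cur ++ pvJoinRun (ls.takeWhile (fun s => !pvIsDelim s)) = ""
        then pvScan (ls.dropWhile (fun s => !pvIsDelim s))
        else (cur ++ pvJoinRun (ls.takeWhile (fun s => !pvIsDelim s))) ::
          pvScan (ls.dropWhile (fun s => !pvIsDelim s))) := by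
  induction ls with
  | nil => intro cur; simp [pvEmit, pvJoinRun_nil, pvScan]
  | cons l rest ih =>
    intro cur
    by_cases hd : pvIsDelim l = true
    · have hrest : pvEmit "" rest = pvScan rest := by
        rw [ih ""]
        simpa using pvScan_step rest
      have hscan : pvScan (l :: rest) = pvScan rest := by simp [pvScan, hd]
      simp [pvEmit, hd, pvJoinRun_nil, hscan, hrest]
    · simp only [pvEmit, hd, Bool.false_eq_true, if_false, List.takeWhile_cons,
        List.dropWhile_cons, Bool.not_false, if_true, pvJoinRun_cons]
      rw [ih (cur ++ l ++ "\n")]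
      simp [String.append_assoc]

theorem pvEmit_empty_eq_scan (ls : List String) : pvEmit "" ls = pvScan ls := by
  rw [pvEmit_eq_scan_form ls ""]
  simpa using pvScan_step ls

-- ===== VERDICT (by name: the statement is the Claim_ definition above) =====
theorem splitIntoPackets_spec : Claim_equal_splitIntoPackets := by
  intro data _
  unfold Spec_splitIntoPackets splitIntoPackets splitIntoPackets_alt
  rw [← pvEmit_empty_eq_scan, ← pvFoldl_eq_emit]
  rfl
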